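-- pv_equiv track=rewrite | github.com/moscalej/nlp_hw | HW2/models/dp_model.py | compare_graph_fast
-- ===== SOURCE A (Python) =====
-- def compare_graph_fast(graph_est, graph_tag):
--     """
--
--     :param graph_est_:
--     :type graph_est_: list
--     :param graph_tag_:
--     :type graph_tag_: list
--     :return:
--     """
--     graph_est_ = list(graph_est.items())
--     graph_tag_ = list(graph_tag.items())
--     if len(graph_est_) != len(graph_tag_):
--         return False
--     graph_est_.sort()
--     graph_tag_.sort()
--     for i in range(len(graph_est_)):
--         if graph_est_[i][0] != graph_tag_[i][0]:
--             return False
--         if set(graph_est_[i][1]) != set(graph_tag_[i][1]):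
--             return False
--
--     return True
-- ===== SOURCE B (Python) =====
-- def compare_graph_fast(graph_est, graph_tag):
--     norm_est = {k: set(v) for k, v in graph_est.items()}
--     norm_tag = {k: set(v) for k, v in graph_tag.items()}
--     return norm_est == norm_tag
-- ===== Notes on version B (the rewrite author's own statement) =====
-- stated objective: idiomatic
-- what changed: Replaces the sort-both-dicts-then-lockstep-index loop by building a normalized dict mapping each key to the set of its values for both arguments and returning plain dict equality (hash key-matching, per-key set comparison).
import Mathlib
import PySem

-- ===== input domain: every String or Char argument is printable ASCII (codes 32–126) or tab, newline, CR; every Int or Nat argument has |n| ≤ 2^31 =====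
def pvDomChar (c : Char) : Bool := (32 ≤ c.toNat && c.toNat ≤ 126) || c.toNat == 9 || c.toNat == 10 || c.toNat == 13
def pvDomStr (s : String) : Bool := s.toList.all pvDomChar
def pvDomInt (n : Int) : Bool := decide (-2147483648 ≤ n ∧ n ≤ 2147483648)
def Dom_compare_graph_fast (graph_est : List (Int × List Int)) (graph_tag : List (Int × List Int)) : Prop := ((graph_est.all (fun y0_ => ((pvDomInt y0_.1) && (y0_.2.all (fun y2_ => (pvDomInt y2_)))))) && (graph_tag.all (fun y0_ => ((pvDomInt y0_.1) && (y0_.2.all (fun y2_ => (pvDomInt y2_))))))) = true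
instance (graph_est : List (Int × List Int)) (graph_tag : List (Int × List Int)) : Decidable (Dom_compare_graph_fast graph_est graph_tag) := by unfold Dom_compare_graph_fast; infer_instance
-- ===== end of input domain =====

-- B replaces A's sort-then-lockstep loop by normalized dicts (key ↦ value-set) compared by dict equality; idiomatic, same results.


-- ===== PORT A =====
-- the indexed for-loop over the two sorted item lists, compared in lockstep (lengths are equal when it runs)
def pvLoopA : List (Int × List Int) → List (Int × List Int) → Bool
  | (k, v) :: es, (k', v') :: ts =>
      if !(k == k') then false
      else if !(PySem.Set.equal (PySem.Set.ofList v) (PySem.Set.ofList v')) then false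
      else pvLoopA es ts
  | _, _ => true

-- Python sorts the (key, values) tuples; a dict's keys are distinct (Pre_), so the tuple
-- comparison never reaches the second components and sorting by the key is exact there.
def compare_graph_fast (graph_est : List (Int × List Int)) (graph_tag : List (Int × List Int)) : Bool :=
  if graph_est.length ≠ graph_tag.length then false
  else pvLoopA (PySem.List.sorted graph_est (fun p => p.1)) (PySem.List.sorted graph_tag (fun p => p.1))

-- ===== PORT B =====
-- {k: set(v) for k, v in g.items()} — keys are distinct (Pre_), so no key is overwritten
def pvNorm (g : List (Int × List Int)) : List (Int × PySem.Set Int) :=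
  g.map (fun p => (p.1, PySem.Set.ofList p.2))

-- Python dict ==: same size, and every key of the first is in the second with an equal value (sets compared as sets)
def pvDictEqBySets (d1 d2 : List (Int × PySem.Set Int)) : Bool :=
  d1.length == d2.length &&
  d1.all (fun p =>
    match d2.find? (fun q => q.1 == p.1) with
    | some q => PySem.Set.equal p.2 q.2
    | none => false)

def compare_graph_fast_alt (graph_est : List (Int × List Int)) (graph_tag : List (Int × List Int)) : Bool :=
  pvDictEqBySets (pvNorm graph_est) (pvNorm graph_tag)

-- ===== PRECONDITION & SPEC =====
-- Pre_ requires each association list to have distinct keys: the Python arguments are dicts,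
-- which cannot hold a duplicate key, so Pre_ excludes no input the Python A accepts.
def Pre_compare_graph_fast (graph_est : List (Int × List Int)) (graph_tag : List (Int × List Int)) : Prop :=
  (graph_est.map Prod.fst).Nodup ∧ (graph_tag.map Prod.fst).Nodup
instance (graph_est : List (Int × List Int)) (graph_tag : List (Int × List Int)) : Decidable (Pre_compare_graph_fast graph_est graph_tag) := by unfold Pre_compare_graph_fast; infer_instance

def pvWitness_compare_graph_fast : (List (Int × List Int)) × (List (Int × List Int)) :=
  ([(1, [1, 2]), (0, [])], [(0, []), (1, [2, 1, 1])])

def Spec_compare_graph_fast (graph_est : List (Int × List Int)) (graph_tag : List (Int × List Int)) (out : Bool) : Prop := out = compare_graph_fast_alt graph_est graph_tag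
instance (graph_est : List (Int × List Int)) (graph_tag : List (Int × List Int)) (out : Bool) : Decidable (Spec_compare_graph_fast graph_est graph_tag out) := by unfold Spec_compare_graph_fast; infer_instance

-- ===== CLAIM (what is proved, stated in full; the proofs are below) =====
def Claim_equal_compare_graph_fast : Prop := ∀ (graph_est : List (Int × List Int)) (graph_tag : List (Int × List Int)), Dom_compare_graph_fast graph_est graph_tag → Pre_compare_graph_fast graph_est graph_tag → Spec_compare_graph_fast graph_est graph_tag (compare_graph_fast graph_est graph_tag)

-- ===== LEMMAS AND PROOFS =====

-- canonical representative of set(v): its elements sorted strictly increasingly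
def pvCanon (v : List Int) : List Int := PySem.List.sorted (PySem.Set.ofList v) (fun x => x)

-- (key, canonical value-set) view of a pair
def pvG (p : Int × List Int) : Int × List Int := (p.1, pvCanon p.2)

theorem pvCanon_perm (v : List Int) : (pvCanon v).Perm (PySem.Set.ofList v) :=
  PySem.List.sorted_perm _ _ _

theorem pvSetEq_iff_canon (v w : List Int) :
    PySem.Set.equal (PySem.Set.ofList v) (PySem.Set.ofList w) = true ↔ pvCanon v = pvCanon w := by
  constructor
  · intro h
    have hsub : ∀ x, x ∈ PySem.Set.ofList v ↔ x ∈ PySem.Set.ofList w := by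
      intro x
      simp only [PySem.Set.equal, PySem.Set.issubset, Bool.and_eq_true, List.all_eq_true,
        PySem.Set.contains, List.contains_eq_mem, decide_eq_true_eq] at h
      exact ⟨fun hx => h.1 x hx, fun hx => h.2 x hx⟩
    have hperm : (PySem.Set.ofList v).Perm (PySem.Set.ofList w) :=
      (List.perm_ext_iff_of_nodup (PySem.Set.nodup_ofList v) (PySem.Set.nodup_ofList w)).2 hsub
    have : PySem.List.sorted (PySem.Set.ofList w) (fun x => x) = pvCanon v := by
      apply PySem.List.sorted_eq_of_perm_of_pairwise_lt
      · exact (pvCanon_perm v).trans hperm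
      · exact PySem.List.sorted_ofList_pairwise_lt v
    exact this.symm
  · intro h
    have hmem : ∀ x, x ∈ PySem.Set.ofList v ↔ x ∈ PySem.Set.ofList w := by
      intro x
      rw [← (pvCanon_perm v).mem_iff, ← (pvCanon_perm w).mem_iff, h]
    simp only [PySem.Set.equal, PySem.Set.issubset, Bool.and_eq_true, List.all_eq_true,
      PySem.Set.contains, List.contains_eq_mem, decide_eq_true_eq]
    exact ⟨fun x hx => (hmem x).1 hx, fun x hx => (hmem x).2 hx⟩

-- the lockstep loop of A, characterized: equal-length lists pass iff their (key, canon) views coincide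
theorem pvLoopA_char : ∀ (es ts : List (Int × List Int)), es.length = ts.length →
    (pvLoopA es ts = true ↔ es.map pvG = ts.map pvG)
  | [], [] => by simp [pvLoopA]
  | [], (t :: ts) => by intro h; simp at h
  | (e :: es), [] => by intro h; simp at h
  | ((k, v) :: es), ((k', v') :: ts) => by
    intro h
    simp only [List.length_cons, Nat.add_right_cancel_iff] at h
    simp only [pvLoopA, List.map_cons, List.cons.injEq]
    by_cases hk : k = k'
    · subst hk
      simp only [BEq.rfl, Bool.not_true, Bool.false_eq_true, if_false]
      by_cases hs : PySem.Set.equal (PySem.Set.ofList v) (PySem.Set.ofList v') = true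
      · have hc := (pvSetEq_iff_canon v v').1 hs
        simp only [hs, Bool.not_true, Bool.false_eq_true, if_false]
        rw [pvLoopA_char es ts h]
        simp [pvG, hc]
      · simp only [Bool.not_eq_true] at hs
        simp only [hs, Bool.not_false, if_true]
        simp only [Bool.false_eq_true, false_iff, not_and]
        intro hg _
        have hcan : pvCanon v = pvCanon v' := by simpa [pvG] using hg
        have := (pvSetEq_iff_canon v v').2 hcan
        rw [hs] at this
        exact Bool.false_ne_true this
    · have hkb : (k == k') = false := by simpa using hk
      simp only [hkb, Bool.not_false, if_true]
      simp only [Bool.false_eq_true, false_iff, not_and]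
      intro hg
      exact absurd (show k = k' by simpa [pvG] using congrArg Prod.fst hg) hk

-- distinct keys make Prod.fst injective on the members of the list
theorem pvKeyInj {l : List (Int × List Int)} (h : (l.map Prod.fst).Nodup)
    {a b : Int × List Int} (ha : a ∈ l) (hb : b ∈ l) (hk : a.1 = b.1) : a = b := by
  by_cases hab : a = b
  · exact hab
  · have hp : l.Pairwise (fun a b => a.1 ≠ b.1) := List.pairwise_map.1 h
    exact absurd hk (hp.forall (fun x y hxy => hxy.symm) ha hb hab)

theorem pvMapG_fst (l : List (Int × List Int)) : (l.map pvG).map Prod.fst = l.map Prod.fst := by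
  simp [Function.comp, pvG]

theorem pvPairwise_lt_of_nodup {l : List (Int × List Int)}
    (hle : l.Pairwise (fun a b => a.1 ≤ b.1)) (hnd : (l.map Prod.fst).Nodup) :
    l.Pairwise (fun a b => a.1 < b.1) := by
  have hne : l.Pairwise (fun a b => a.1 ≠ b.1) := List.pairwise_map.1 hnd
  exact (hle.and hne).imp (fun h => lt_of_le_of_ne h.1 h.2)

-- sorting-by-key commutes with the (key, canon) view when keys are distinct
theorem pvSorted_map_comm {l : List (Int × List Int)} (hnd : (l.map Prod.fst).Nodup) :
    PySem.List.sorted (l.map pvG) (fun p => p.1) =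
      (PySem.List.sorted l (fun p => p.1)).map pvG := by
  apply PySem.List.sorted_eq_of_perm_of_pairwise_lt
  · exact (PySem.List.sorted_perm l (fun p => p.1) false).map pvG
  · have hnd' : ((PySem.List.sorted l (fun p => p.1)).map Prod.fst).Nodup := by
      refine ((PySem.List.sorted_perm l (fun p => p.1) false).map Prod.fst).nodup_iff.2 hnd
    have hlt := pvPairwise_lt_of_nodup
      (PySem.List.sorted_pairwise l (fun p => p.1) : _) hnd'
    rw [List.pairwise_map]
    exact hlt.imp (fun h => h)

-- A characterized: lengths equal and the (key, canon) views are permutations of one another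
theorem pvA_char (est tag : List (Int × List Int))
    (he : (est.map Prod.fst).Nodup) (ht : (tag.map Prod.fst).Nodup) :
    (compare_graph_fast est tag = true ↔
      est.length = tag.length ∧ (est.map pvG).Perm (tag.map pvG)) := by
  unfold compare_graph_fast
  split_ifs with hlen
  · simp only [false_iff, not_and]
    intro h; exact absurd h hlen
  · rw [not_ne_iff] at hlen
    have hlens : (PySem.List.sorted est (fun p => p.1)).length
        = (PySem.List.sorted tag (fun p => p.1)).length := by
      rw [PySem.List.length_sorted, PySem.List.length_sorted, hlen]
    rw [pvLoopA_char _ _ hlens, ← pvSorted_map_comm he, ← pvSorted_map_comm ht]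
    constructor
    · intro hsort
      refine ⟨hlen, ?_⟩
      have h1 : (est.map pvG).Perm (PySem.List.sorted (est.map pvG) (fun p => p.1)) :=
        (PySem.List.sorted_perm _ _ _).symm
      rw [hsort] at h1
      exact h1.trans (PySem.List.sorted_perm _ _ _)
    · rintro ⟨-, hperm⟩
      apply PySem.List.sorted_eq_of_perm_of_pairwise_lt
      · exact (PySem.List.sorted_perm (tag.map pvG) (fun p => p.1) false).trans hperm.symm
      · have hndT : ((PySem.List.sorted (tag.map pvG) (fun p => p.1)).map Prod.fst).Nodup := by
          refine ((PySem.List.sorted_perm (tag.map pvG) (fun p => p.1) false).map Prod.fst).nodup_iff.2 ?_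
          rw [pvMapG_fst]; exact ht
        exact pvPairwise_lt_of_nodup (PySem.List.sorted_pairwise _ _ : _) hndT

-- B characterized: the same condition
theorem pvB_char (est tag : List (Int × List Int))
    (he : (est.map Prod.fst).Nodup) (ht : (tag.map Prod.fst).Nodup) :
    (compare_graph_fast_alt est tag = true ↔
      est.length = tag.length ∧ (est.map pvG).Perm (tag.map pvG)) := by
  unfold compare_graph_fast_alt pvDictEqBySets pvNorm
  rw [Bool.and_eq_true, List.all_eq_true]
  simp only [List.length_map, beq_iff_eq]
  constructor
  · rintro ⟨hlen, hall⟩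
    refine ⟨hlen, ?_⟩
    have hsub : (est.map pvG) ⊆ (tag.map pvG) := by
      intro x hx
      rcases List.mem_map.1 hx with ⟨p, hp, rfl⟩
      have := hall (p.1, PySem.Set.ofList p.2) (List.mem_map.2 ⟨p, hp, rfl⟩)
      rcases hfind : List.find? (fun q => q.1 == p.1)
          (tag.map (fun p => (p.1, PySem.Set.ofList p.2))) with _ | q
      · rw [hfind] at this; exact absurd this (by simp)
      · rw [hfind] at this
        have hq := List.find?_some hfind
        have hqmem := List.mem_of_find?_eq_some hfind
        rcases List.mem_map.1 hqmem with ⟨r, hr, hrq⟩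
        have hkey : q.1 = p.1 := by simpa using hq
        have hset : PySem.Set.equal (PySem.Set.ofList p.2) q.2 = true := this
        have hq2 : q.2 = PySem.Set.ofList r.2 := by rw [← hrq]
        have hr1 : r.1 = p.1 := by rw [← hrq] at hkey; simpa using hkey
        have hcan : pvCanon p.2 = pvCanon r.2 := by
          apply (pvSetEq_iff_canon p.2 r.2).1
          rw [← hq2]; exact hset
        refine List.mem_map.2 ⟨r, hr, ?_⟩
        simp [pvG, hr1, hcan]
    have hndE : (est.map pvG).Nodup := (List.Nodup.of_map Prod.fst) (by rw [pvMapG_fst]; exact he)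
    have hsp : (est.map pvG).Subperm (tag.map pvG) := hndE.subperm hsub
    exact hsp.perm_of_length_le (by simp [hlen])
  · rintro ⟨hlen, hperm⟩
    refine ⟨hlen, ?_⟩
    rintro x hx
    rcases List.mem_map.1 hx with ⟨p, hp, rfl⟩
    show (match List.find? (fun q => q.1 == p.1)
        (List.map (fun p => (p.1, PySem.Set.ofList p.2)) tag) with
      | some q => PySem.Set.equal (PySem.Set.ofList p.2) q.2
      | none => false) = true
    have hmemT : pvG p ∈ tag.map pvG := hperm.subset (List.mem_map.2 ⟨p, hp, rfl⟩)
    rcases List.mem_map.1 hmemT with ⟨r, hr, hgr⟩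
    have hr1 : r.1 = p.1 := by
      have := congrArg Prod.fst hgr; simpa [pvG] using this
    have hrc : pvCanon r.2 = pvCanon p.2 := by
      have := congrArg Prod.snd hgr; simpa [pvG] using this
    -- find? succeeds: r's image witnesses a match
    have hex : ∃ q ∈ tag.map (fun p => (p.1, PySem.Set.ofList p.2)),
        (fun q => q.1 == p.1) q = true := by
      exact ⟨(r.1, PySem.Set.ofList r.2), List.mem_map.2 ⟨r, hr, rfl⟩, by simp [hr1]⟩
    rcases hfind : List.find? (fun q => q.1 == p.1)
        (tag.map (fun p => (p.1, PySem.Set.ofList p.2))) with _ | q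
    · rw [List.find?_eq_none] at hfind
      rcases hex with ⟨q, hq, hqp⟩
      exact absurd hqp (by simpa using hfind q hq)
    · have hq := List.find?_some hfind
      have hqmem := List.mem_of_find?_eq_some hfind
      rcases List.mem_map.1 hqmem with ⟨s, hs, hsq⟩
      have hs1 : s.1 = p.1 := by
        rw [← hsq] at hq; simpa using hq
      have hsr : s = r := pvKeyInj ht hs hr (by rw [hs1, hr1])
      have : PySem.Set.equal (PySem.Set.ofList p.2) (PySem.Set.ofList s.2) = true := by
        apply (pvSetEq_iff_canon p.2 s.2).2
        rw [hsr, hrc]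
      rw [hfind, ← hsq]
      exact this

-- ===== VERDICT (by name: the statement is the Claim_ definition above) =====
theorem compare_graph_fast_spec : Claim_equal_compare_graph_fast := by
  intro est tag _ hpre
  unfold Spec_compare_graph_fast
  rcases hpre with ⟨he, ht⟩
  have hA := pvA_char est tag he ht
  have hB := pvB_char est tag he ht
  rw [Bool.eq_iff_iff, hA, hB]
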